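-- pv_equiv track=rewrite | github.com/summer1030/GraphQA | GraphBuildingByEmbedInitializeReduced.py | process_leaves_info
-- ===== SOURCE A (Python) =====
-- def process_leaves_info(nodes, words, virtual_node_mapping):
--     info={}
--     for each in words:
--         info.setdefault(each[0],[])
--         info[each[0]] += [each[2]]
--     mapping_index=[]
--     for each in info:
--         if each not in virtual_node_mapping:
--             continue
--         s,e=min(info[each]),max(info[each])
--         if nodes[each]['nodeType']!='Leaf':
--             mapping_index += [(each,s,e)]
--     return mapping_index
-- ===== SOURCE B (Python) =====
-- def process_leaves_info(nodes, words, virtual_node_mapping):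
--     # Group-by via per-key rescans: dedup the keys in first-occurrence order,
--     # then compute each key's (min, max) range directly from words. No dict of
--     # collected value lists is ever built.
--     keys = list(dict.fromkeys(w[0] for w in words))
--     out = []
--     for k in keys:
--         if k in virtual_node_mapping and nodes[k]['nodeType'] != 'Leaf':
--             vals = [v for key, _, v in words if key == k]
--             out.append((k, min(vals), max(vals)))
--     return out
-- ===== Notes on version B (the rewrite author's own statement) =====
-- stated objective: alternative
-- what changed: B never builds A's dict of per-key value lists: it dedups the word keys in first-occurrence order (dict.fromkeys) and then, per surviving key, rescans words to take min/max of that key's values directly - a group-by via per-key scans instead of a one-pass accumulation, trading O(W) grouped storage for O(K*W) rescans.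
import Mathlib
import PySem

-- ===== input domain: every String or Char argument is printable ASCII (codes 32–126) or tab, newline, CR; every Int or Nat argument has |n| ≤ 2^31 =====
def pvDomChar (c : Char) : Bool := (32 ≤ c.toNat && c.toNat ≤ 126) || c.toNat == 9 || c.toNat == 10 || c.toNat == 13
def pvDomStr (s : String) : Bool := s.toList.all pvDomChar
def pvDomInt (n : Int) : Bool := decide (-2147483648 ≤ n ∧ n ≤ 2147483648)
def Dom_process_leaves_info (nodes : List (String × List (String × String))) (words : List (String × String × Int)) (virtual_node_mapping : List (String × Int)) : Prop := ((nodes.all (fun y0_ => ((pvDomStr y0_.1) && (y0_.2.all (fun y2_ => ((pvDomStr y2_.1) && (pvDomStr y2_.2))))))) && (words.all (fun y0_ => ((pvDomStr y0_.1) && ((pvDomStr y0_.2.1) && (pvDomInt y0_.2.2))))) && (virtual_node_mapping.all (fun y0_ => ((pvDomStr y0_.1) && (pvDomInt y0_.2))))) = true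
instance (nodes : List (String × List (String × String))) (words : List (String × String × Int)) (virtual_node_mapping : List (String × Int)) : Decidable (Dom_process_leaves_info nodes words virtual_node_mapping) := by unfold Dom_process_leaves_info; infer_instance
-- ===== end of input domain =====

-- ===== PORT A =====
def process_leaves_info (nodes : List (String × List (String × String))) (words : List (String × String × Int)) (virtual_node_mapping : List (String × Int)) : List (String × Int × Int) :=
  let info : PySem.Dict String (List Int) :=
    words.foldl (fun d each =>
      let d := d.setdefault each.1 []
      d.insert each.1 (d.getD each.1 [] ++ [each.2.2])) PySem.Dict.empty
  info.items.foldl (fun acc p =>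
    if (PySem.Dict.mk virtual_node_mapping).contains p.1 then
      match PySem.List.min? p.2 (fun x => x), PySem.List.max? p.2 (fun x => x) with
      | some s, some e =>
        match (PySem.Dict.mk nodes).get? p.1 with
        | some nd =>
          match (PySem.Dict.mk nd).get? "nodeType" with
          | some t => if t ≠ "Leaf" then acc ++ [(p.1, s, e)] else acc
          | none => acc  -- KeyError in Python: excluded by Pre_
        | none => acc    -- KeyError in Python: excluded by Pre_
      | _, _ => acc      -- totality guard: every stored list is nonempty
    else acc) []

-- ===== PORT B =====
-- B (Source B): dedup the keys in first-occurrence order, then per key rescan words for min/max.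
def process_leaves_info_alt (nodes : List (String × List (String × String))) (words : List (String × String × Int)) (virtual_node_mapping : List (String × Int)) : List (String × Int × Int) :=
  let keys := PySem.List.dedup (words.map (fun w => w.1))   -- list(dict.fromkeys(...))
  keys.foldl (fun out k =>
    if (PySem.Dict.mk virtual_node_mapping).contains k then
      match (PySem.Dict.mk nodes).get? k with
      | some nd =>
        match (PySem.Dict.mk nd).get? "nodeType" with
        | some t =>
          if t ≠ "Leaf" then
            let vals := (words.filter (fun w => w.1 == k)).map (fun w => w.2.2)
            match PySem.List.min? vals (fun x => x) with
            | none => out   -- min([]) ValueError: unreachable, every key occurs in words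
            | some s =>
              match PySem.List.max? vals (fun x => x) with
              | none => out
              | some e => out ++ [(k, s, e)]
          else out
        | none => out  -- KeyError in Python: excluded by Pre_
      | none => out    -- KeyError in Python: excluded by Pre_
    else out) []

-- ===== PRECONDITION & SPEC =====
-- Pre_ excludes exactly the inputs where Python raises KeyError (in A and in B alike): a word key
-- that is a key of virtual_node_mapping but is missing from nodes, or whose node lacks 'nodeType'.
def Pre_process_leaves_info (nodes : List (String × List (String × String))) (words : List (String × String × Int)) (virtual_node_mapping : List (String × Int)) : Prop :=
  (words.all (fun w =>
    !(PySem.Dict.mk virtual_node_mapping).contains w.1 ||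
      (match (PySem.Dict.mk nodes).get? w.1 with
       | some nd => ((PySem.Dict.mk nd).get? "nodeType").isSome
       | none => false))) = true
instance (nodes : List (String × List (String × String))) (words : List (String × String × Int)) (virtual_node_mapping : List (String × Int)) : Decidable (Pre_process_leaves_info nodes words virtual_node_mapping) := by unfold Pre_process_leaves_info; infer_instance

def pvWitness_process_leaves_info : (List (String × List (String × String))) × (List (String × String × Int)) × (List (String × Int)) :=
  ([("a", [("nodeType", "X")]), ("b", [("nodeType", "Leaf")])],
   [("a", "u", 3), ("a", "v", -1), ("b", "w", 2)],
   [("a", 0), ("b", 1)])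

def Spec_process_leaves_info (nodes : List (String × List (String × String))) (words : List (String × String × Int)) (virtual_node_mapping : List (String × Int)) (out : List (String × Int × Int)) : Prop := out = process_leaves_info_alt nodes words virtual_node_mapping
instance (nodes : List (String × List (String × String))) (words : List (String × String × Int)) (virtual_node_mapping : List (String × Int)) (out : List (String × Int × Int)) : Decidable (Spec_process_leaves_info nodes words virtual_node_mapping out) := by unfold Spec_process_leaves_info; infer_instance

-- ===== CLAIM (what is proved, stated in full; the proofs are below) =====
def Claim_equal_process_leaves_info : Prop := ∀ (nodes : List (String × List (String × String))) (words : List (String × String × Int)) (virtual_node_mapping : List (String × Int)), Dom_process_leaves_info nodes words virtual_node_mapping → Pre_process_leaves_info nodes words virtual_node_mapping → Spec_process_leaves_info nodes words virtual_node_mapping (process_leaves_info nodes words virtual_node_mapping)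

-- ===== LEMMAS AND PROOFS =====

-- A's loop body (setdefault then append-insert) is exactly Dict.modify with default [].
theorem pv_step_modify (d : PySem.Dict String (List Int)) (k : String) (v : Int) :
    (d.setdefault k []).insert k ((d.setdefault k []).getD k [] ++ [v])
      = d.modify k [] (fun l => l ++ [v]) := by
  by_cases hc : d.contains k = true
  · rw [PySem.Dict.setdefault_of_contains _ _ hc]; rfl
  · have hc' : d.contains k = false := by
      cases h : d.contains k with
      | false => rfl
      | true => exact absurd h hc
    rw [PySem.Dict.setdefault_of_not_contains _ _ hc']
    rw [PySem.Dict.getD_insert_self, PySem.Dict.insert_insert_self]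
    show d.insert k ([] ++ [v]) = d.insert k (d.getD k [] ++ [v])
    simp [PySem.Dict.getD_of_not_contains, hc']

-- A's grouping dict, item by item: first-occurrence keys paired with that key's values in order.
theorem pv_info_items (words : List (String × String × Int)) :
    (words.foldl (fun d each =>
      let d := d.setdefault each.1 []
      d.insert each.1 (d.getD each.1 [] ++ [each.2.2])) (PySem.Dict.empty : PySem.Dict String (List Int))).items
    = (PySem.List.dedup (words.map (fun w => w.1))).map
        (fun k => (k, (words.filter (fun w => w.1 == k)).map (fun w => w.2.2))) := by
  have hstep : (fun (d : PySem.Dict String (List Int)) (each : String × String × Int) =>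
      let d := d.setdefault each.1 []
      d.insert each.1 (d.getD each.1 [] ++ [each.2.2]))
    = fun d each => d.modify each.1 [] (fun l => l ++ [each.2.2]) := by
    funext d each
    exact pv_step_modify d each.1 each.2.2
  rw [hstep]
  have hnd : (words.foldl (fun d each =>
      d.modify each.1 [] (fun l => l ++ [each.2.2])) (PySem.Dict.empty : PySem.Dict String (List Int))).keys.Nodup :=
    PySem.Dict.nodup_keys_foldl_modify_key words (fun w => w.1) [] (fun _ w l => l ++ [w.2.2])
      PySem.Dict.empty (by simp)
  rw [PySem.Dict.items_eq_map_keys _ hnd []]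
  have hkeys : (words.foldl (fun d each =>
      d.modify each.1 [] (fun l => l ++ [each.2.2])) (PySem.Dict.empty : PySem.Dict String (List Int))).keys
      = PySem.List.dedup (words.map (fun w => w.1)) := by
    have := PySem.Dict.keys_foldl_modify_key words (fun w => w.1) [] (fun _ w l => l ++ [w.2.2])
      (PySem.Dict.empty : PySem.Dict String (List Int))
    rw [this]
    simp [PySem.Dict.keys_empty]
    rfl
  rw [hkeys]
  apply List.map_congr_left
  intro k _
  have hgd : (words.foldl (fun d each =>
      d.modify each.1 [] (fun l => l ++ [each.2.2])) (PySem.Dict.empty : PySem.Dict String (List Int))).getD k []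
      = (words.filter (fun w => w.1 == k)).map (fun w => w.2.2) := by
    have hmap : words.foldl (fun d each => d.modify each.1 [] (fun l => l ++ [each.2.2]))
        (PySem.Dict.empty : PySem.Dict String (List Int))
        = (words.map (fun w => (w.1, w.2.2))).foldl
            (fun d p => d.modify p.1 [] (fun l => l ++ [p.2])) PySem.Dict.empty := by
      rw [List.foldl_map]
    rw [hmap, PySem.Dict.getD_foldl_modify_append]
    rw [PySem.Dict.getD_empty, List.filter_map, List.map_map]
    simp only [Function.comp_def, List.nil_append]
  rw [hgd]

-- ===== VERDICT (by name: the statement is the Claim_ definition above) =====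
theorem process_leaves_info_spec : Claim_equal_process_leaves_info := by
  intro nodes words vnm _ _
  unfold Spec_process_leaves_info
  simp only [process_leaves_info, process_leaves_info_alt]
  rw [pv_info_items, List.foldl_map]
  apply PySem.List.foldl_congr_mem
  intro acc k hk
  have hkel : k ∈ words.map (fun w => w.1) := (PySem.List.mem_dedup _ _).mp hk
  obtain ⟨w, hw, hwk⟩ := List.mem_map.mp hkel
  have hmem : w ∈ words.filter (fun w' => w'.1 == k) :=
    List.mem_filter.mpr ⟨hw, by simp [hwk]⟩
  have hne : (words.filter (fun w' => w'.1 == k)).map (fun w => w.2.2) ≠ [] := by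
    simp only [ne_eq, List.map_eq_nil_iff]
    exact List.ne_nil_of_mem hmem
  obtain ⟨x, t, hxt⟩ := List.exists_cons_of_ne_nil hne
  rw [hxt, PySem.List.min?_id_cons, PySem.List.max?_id_cons]
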